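-- pv_equiv track=rewrite | github.com/choisimo/vid_to_sub | vid_to_sub_app/tui/helpers.py | partition_paths_by_capacity
-- ===== SOURCE A (Python) =====
-- from collections.abc import Sequence
--
-- def partition_paths_by_capacity(
--     paths: Sequence[str],
--     capacities: Sequence[tuple[str, int]],
-- ) -> dict[str, list[str]]:
--     assignments = {name: [] for name, capacity in capacities if capacity > 0}
--     schedule: list[str] = []
--     for name, capacity in capacities:
--         schedule.extend([name] * max(0, capacity))
--     if not schedule:
--         return assignments
--     for idx, path in enumerate(paths):
--         assignments[schedule[idx % len(schedule)]].append(path)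
--     return assignments
-- ===== SOURCE B (Python) =====
-- def partition_paths_by_capacity(paths, capacities):
--     # Bucket-major gather: each positive-capacity entry owns a half-open window of
--     # residues modulo the total capacity; each bucket collects exactly the paths
--     # whose index residue falls in one of its windows.  No per-slot schedule list.
--     windows = {}
--     offset = 0
--     for name, cap in capacities:
--         if cap > 0:
--             windows.setdefault(name, []).append((offset, offset + cap))
--             offset += cap
--     if offset == 0:
--         return {name: [] for name in windows}
--     return {
--         name: [p for i, p in enumerate(paths)
--                if any(s <= i % offset < e for s, e in spans)]
--         for name, spans in windows.items()
--     }
-- ===== Notes on version B (the rewrite author's own statement) =====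
-- stated objective: alternative
-- what changed: A materializes a per-slot schedule list (one entry per unit of capacity) and scatters paths into the dict path-by-path; B never builds the schedule: it assigns each positive-capacity entry a half-open residue window [offset, offset+cap) modulo the total capacity and gathers each bucket's paths by a residue-window membership test.
import Mathlib
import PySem

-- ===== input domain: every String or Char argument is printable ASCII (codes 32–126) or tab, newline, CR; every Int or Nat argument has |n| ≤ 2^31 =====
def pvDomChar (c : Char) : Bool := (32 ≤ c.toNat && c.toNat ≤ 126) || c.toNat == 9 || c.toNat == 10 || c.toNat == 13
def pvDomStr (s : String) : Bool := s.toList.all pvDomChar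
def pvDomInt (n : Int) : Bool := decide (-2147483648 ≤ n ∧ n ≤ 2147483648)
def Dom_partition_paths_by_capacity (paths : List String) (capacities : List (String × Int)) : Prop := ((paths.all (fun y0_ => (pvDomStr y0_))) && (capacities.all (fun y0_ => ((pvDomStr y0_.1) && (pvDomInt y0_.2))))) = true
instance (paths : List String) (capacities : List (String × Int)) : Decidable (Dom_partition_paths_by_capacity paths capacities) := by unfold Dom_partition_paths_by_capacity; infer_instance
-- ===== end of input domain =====

-- B replaces A's path-major scatter over a materialized per-slot schedule list by a
-- bucket-major gather over half-open residue windows (objective: alternative).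

-- ===== PORT A =====
-- Literal port of A.  The defaults of `pyGetD` and `Dict.modify` are never used:
-- the index is `idx % len(schedule)` with a nonempty schedule, and the key looked up
-- is a schedule name, which always has capacity > 0 and hence is a dict key.
def partition_paths_by_capacity (paths : List String) (capacities : List (String × Int)) : List (String × List String) :=
  let assignments : PySem.Dict String (List String) :=
    capacities.foldl (fun d nc => if nc.2 > 0 then d.insert nc.1 [] else d) PySem.Dict.empty
  let schedule : List String :=
    capacities.foldl (fun s nc => s ++ List.replicate (max 0 nc.2).toNat nc.1) []
  if schedule = [] then assignments.items
  else
    ((PySem.List.enumerate paths).foldl (fun d ip =>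
        d.modify (PySem.List.pyGetD schedule (PySem.Int.mod ip.1 (schedule.length : Int)) "") []
          (fun l => l ++ [ip.2]))
      assignments).items

-- ===== PORT B =====
-- span predicate: s <= r < e
def pvPred (r : Int) (se : Int × Int) : Bool := decide (se.1 ≤ r) && decide (r < se.2)

-- one step of B's window-building loop: windows.setdefault(name, []).append((offset, offset+cap)); offset += cap
def pvStepB (st : PySem.Dict String (List (Int × Int)) × Int) (nc : String × Int) :
    PySem.Dict String (List (Int × Int)) × Int :=
  if nc.2 > 0 then (st.1.modify nc.1 [] (fun l => l ++ [(st.2, st.2 + nc.2)]), st.2 + nc.2)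
  else st

def partition_paths_by_capacity_alt (paths : List String) (capacities : List (String × Int)) : List (String × List String) :=
  let wt := capacities.foldl pvStepB (PySem.Dict.empty, 0)
  if wt.2 = 0 then wt.1.items.map (fun nv => (nv.1, []))
  else
    wt.1.items.map (fun nv => (nv.1,
      (PySem.List.enumerate paths).filterMap (fun ip =>
        if nv.2.any (pvPred (PySem.Int.mod ip.1 wt.2)) then some ip.2 else none)))

-- ===== PRECONDITION & SPEC =====
def Spec_partition_paths_by_capacity (paths : List String) (capacities : List (String × Int)) (out : List (String × List String)) : Prop := out = partition_paths_by_capacity_alt paths capacities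
instance (paths : List String) (capacities : List (String × Int)) (out : List (String × List String)) : Decidable (Spec_partition_paths_by_capacity paths capacities out) := by unfold Spec_partition_paths_by_capacity; infer_instance

-- ===== CLAIM (what is proved, stated in full; the proofs are below) =====
def Claim_equal_partition_paths_by_capacity : Prop := ∀ (paths : List String) (capacities : List (String × Int)), Dom_partition_paths_by_capacity paths capacities → Spec_partition_paths_by_capacity paths capacities (partition_paths_by_capacity paths capacities)

-- ===== LEMMAS AND PROOFS =====

-- proof-only abbreviations for the three folds, generalized over their start state
def pvSched (s : List String) (caps : List (String × Int)) : List String :=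
  caps.foldl (fun s nc => s ++ List.replicate (max 0 nc.2).toNat nc.1) s

def pvA0 (d : PySem.Dict String (List String)) (caps : List (String × Int)) :
    PySem.Dict String (List String) :=
  caps.foldl (fun d nc => if nc.2 > 0 then d.insert nc.1 [] else d) d

def pvWin (st : PySem.Dict String (List (Int × Int)) × Int) (caps : List (String × Int)) :
    PySem.Dict String (List (Int × Int)) × Int :=
  caps.foldl pvStepB st

theorem pvA_eq (paths : List String) (caps : List (String × Int)) :
    partition_paths_by_capacity paths caps =
      (if pvSched [] caps = [] then (pvA0 PySem.Dict.empty caps).items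
       else
        ((PySem.List.enumerate paths).foldl (fun d ip =>
            d.modify (PySem.List.pyGetD (pvSched [] caps)
                (PySem.Int.mod ip.1 ((pvSched [] caps).length : Int)) "") []
              (fun l => l ++ [ip.2]))
          (pvA0 PySem.Dict.empty caps)).items) := rfl

theorem pvB_eq (paths : List String) (caps : List (String × Int)) :
    partition_paths_by_capacity_alt paths caps =
      (if (pvWin (PySem.Dict.empty, 0) caps).2 = 0 then
        (pvWin (PySem.Dict.empty, 0) caps).1.items.map (fun nv => (nv.1, []))
       else
        (pvWin (PySem.Dict.empty, 0) caps).1.items.map (fun nv => (nv.1,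
          (PySem.List.enumerate paths).filterMap (fun ip =>
            if nv.2.any (pvPred (PySem.Int.mod ip.1 (pvWin (PySem.Dict.empty, 0) caps).2))
            then some ip.2 else none)))) := rfl

-- the master invariant: B's window fold describes exactly A's schedule fold
theorem pvMaster (caps : List (String × Int)) (d : PySem.Dict String (List (Int × Int)))
    (s : List String)
    (hb : ∀ name, ∀ se ∈ d.getD name [], 0 ≤ se.1 ∧ se.1 < se.2 ∧ se.2 ≤ (s.length : Int))
    (hm : ∀ name (r : Int), 0 ≤ r → r < (s.length : Int) →
      (((d.getD name []).any (pvPred r) = true) ↔ s.getD r.toNat "" = name)) :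
    (pvWin (d, (s.length : Int)) caps).2 = ((pvSched s caps).length : Int)
    ∧ (∀ name, ∀ se ∈ (pvWin (d, (s.length : Int)) caps).1.getD name [],
        0 ≤ se.1 ∧ se.1 < se.2 ∧ se.2 ≤ ((pvSched s caps).length : Int))
    ∧ (∀ name (r : Int), 0 ≤ r → r < ((pvSched s caps).length : Int) →
        ((((pvWin (d, (s.length : Int)) caps).1.getD name []).any (pvPred r) = true) ↔
          (pvSched s caps).getD r.toNat "" = name)) := by
  induction caps generalizing d s with
  | nil => exact ⟨rfl, hb, hm⟩
  | cons nc rest ih =>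
    obtain ⟨m, c⟩ := nc
    by_cases hc : c > 0
    · have hmax : (max 0 c).toNat = c.toNat := by omega
      have hwin : pvWin (d, (s.length : Int)) ((m, c) :: rest)
          = pvWin (d.modify m [] (fun l => l ++ [((s.length : Int), (s.length : Int) + c)]),
              (s.length : Int) + c) rest := by
        simp [pvWin, pvStepB, hc]
      have hsch : pvSched s ((m, c) :: rest) = pvSched (s ++ List.replicate c.toNat m) rest := by
        simp [pvSched, hmax]
      have hlen : ((s ++ List.replicate c.toNat m).length : Int) = (s.length : Int) + c := by
        simp [Int.toNat_of_nonneg (le_of_lt hc)]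
      rw [hwin, hsch, ← hlen]
      apply ih
      · -- bounds
        intro name se hse
        by_cases hnm : name = m
        · subst hnm
          rw [PySem.Dict.getD_modify_self] at hse
          rcases List.mem_append.mp hse with h | h
          · have := hb name se h
            refine ⟨this.1, this.2.1, ?_⟩
            rw [hlen]; omega
          · rw [List.mem_singleton] at h
            subst h
            exact ⟨by positivity, by rw [hlen]; omega, le_refl _⟩
        · rw [PySem.Dict.getD_modify_of_ne _ _ _ hnm] at hse
          have := hb name se hse
          refine ⟨this.1, this.2.1, ?_⟩
          rw [hlen]; omega
      · -- match
        intro name r hr0 hrlt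
        rw [hlen] at hrlt
        by_cases hrs : r < (s.length : Int)
        · have hget : (s ++ List.replicate c.toNat m).getD r.toNat "" = s.getD r.toNat "" := by
            rw [List.getD_append]
            omega
          rw [hget]
          by_cases hnm : name = m
          · subst hnm
            rw [PySem.Dict.getD_modify_self, List.any_append, List.any_cons, List.any_nil]
            have hp : pvPred r ((s.length : Int), ((s ++ List.replicate c.toNat name).length : Int)) = false := by
              simp only [pvPred, Bool.and_eq_false_iff, decide_eq_false_iff_not]
              left; omega
            rw [hp, Bool.or_false, Bool.or_false]
            exact hm _ r hr0 hrs
          · rw [PySem.Dict.getD_modify_of_ne _ _ _ hnm]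
            exact hm name r hr0 hrs
        · rw [not_lt] at hrs
          have hget : (s ++ List.replicate c.toNat m).getD r.toNat "" = m := by
            rw [List.getD_eq_getElem _ _ (by simp; omega)]
            rw [List.getElem_append_right (by omega)]
            simp
          rw [hget]
          by_cases hnm : name = m
          · subst hnm
            rw [PySem.Dict.getD_modify_self, List.any_append, List.any_cons, List.any_nil]
            have hp : pvPred r ((s.length : Int), ((s ++ List.replicate c.toNat name).length : Int)) = true := by
              simp only [pvPred, Bool.and_eq_true, decide_eq_true_eq]
              rw [hlen]
              constructor <;> omega
            rw [hp]
            simp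
          · rw [PySem.Dict.getD_modify_of_ne _ _ _ hnm]
            constructor
            · intro hany
              obtain ⟨se, hse, hp⟩ := List.any_eq_true.mp hany
              have hbb := hb name se hse
              simp only [pvPred, Bool.and_eq_true, decide_eq_true_eq] at hp
              omega
            · intro h
              exact absurd h.symm hnm
    · have hmax : (max 0 c).toNat = 0 := by omega
      have hwin : pvWin (d, (s.length : Int)) ((m, c) :: rest)
          = pvWin (d, (s.length : Int)) rest := by
        simp [pvWin, pvStepB, hc]
      have hsch : pvSched s ((m, c) :: rest) = pvSched s rest := by
        simp [pvSched, hmax]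
      rw [hwin, hsch]
      exact ih d s hb hm

-- A's initial dict and B's windows dict have identical key lists
theorem pvKeysPar (caps : List (String × Int)) (d0 : PySem.Dict String (List String))
    (dw : PySem.Dict String (List (Int × Int))) (n : Int) (h : d0.keys = dw.keys) :
    (pvA0 d0 caps).keys = (pvWin (dw, n) caps).1.keys := by
  induction caps generalizing d0 dw n with
  | nil => exact h
  | cons nc rest ih =>
    obtain ⟨m, c⟩ := nc
    by_cases hc : c > 0
    · have h1 : pvA0 d0 ((m, c) :: rest) = pvA0 (d0.insert m []) rest := by
        simp [pvA0, hc]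
      have h2 : pvWin (dw, n) ((m, c) :: rest)
          = pvWin (dw.modify m [] (fun l => l ++ [(n, n + c)]), n + c) rest := by
        simp [pvWin, pvStepB, hc]
      rw [h1, h2]
      apply ih
      rw [PySem.Dict.keys_modify]
      have hcon : d0.contains m = dw.contains m := by
        rw [PySem.Dict.contains_eq_decide_mem_keys, PySem.Dict.contains_eq_decide_mem_keys, h]
      cases hd : d0.contains m with
      | true =>
        rw [PySem.Dict.keys_insert_of_contains _ _ hd,
            PySem.Dict.keys_insert_of_contains _ _ (hcon ▸ hd), h]
      | false =>
        rw [PySem.Dict.keys_insert_of_not_contains _ _ hd,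
            PySem.Dict.keys_insert_of_not_contains _ _ (hcon ▸ hd), h]
    · have h1 : pvA0 d0 ((m, c) :: rest) = pvA0 d0 rest := by simp [pvA0, hc]
      have h2 : pvWin (dw, n) ((m, c) :: rest) = pvWin (dw, n) rest := by
        simp [pvWin, pvStepB, hc]
      rw [h1, h2]
      exact ih d0 dw n h
  
theorem pvA0_nodup (caps : List (String × Int)) (d : PySem.Dict String (List String))
    (h : d.keys.Nodup) : (pvA0 d caps).keys.Nodup := by
  induction caps generalizing d with
  | nil => exact h
  | cons nc rest ih =>
    by_cases hc : nc.2 > 0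
    · have : pvA0 d (nc :: rest) = pvA0 (d.insert nc.1 []) rest := by simp [pvA0, hc]
      rw [this]
      exact ih _ (PySem.Dict.nodup_keys_insert _ _ _ h)
    · have : pvA0 d (nc :: rest) = pvA0 d rest := by simp [pvA0, hc]
      rw [this]
      exact ih _ h

theorem pvA0_getD (caps : List (String × Int)) (d : PySem.Dict String (List String))
    (h : ∀ k, d.getD k [] = []) (k : String) : (pvA0 d caps).getD k [] = [] := by
  induction caps generalizing d with
  | nil => exact h k
  | cons nc rest ih =>
    by_cases hc : nc.2 > 0
    · have he : pvA0 d (nc :: rest) = pvA0 (d.insert nc.1 []) rest := by simp [pvA0, hc]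
      rw [he]
      apply ih
      intro k'
      rw [PySem.Dict.getD_insert]
      split <;> [rfl; exact h k']
    · have he : pvA0 d (nc :: rest) = pvA0 d rest := by simp [pvA0, hc]
      rw [he]
      exact ih d h

theorem pvKeysMono (caps : List (String × Int)) (d : PySem.Dict String (List String))
    (x : String) (h : x ∈ d.keys) : x ∈ (pvA0 d caps).keys := by
  induction caps generalizing d with
  | nil => exact h
  | cons nc rest ih =>
    by_cases hc : nc.2 > 0
    · have he : pvA0 d (nc :: rest) = pvA0 (d.insert nc.1 []) rest := by simp [pvA0, hc]
      rw [he]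
      exact ih _ ((PySem.Dict.mem_keys_insert _ _ _ _).mpr (Or.inr h))
    · have he : pvA0 d (nc :: rest) = pvA0 d rest := by simp [pvA0, hc]
      rw [he]
      exact ih d h

-- every schedule entry is a key of A's initial dict
theorem pvSchedMem (caps : List (String × Int)) (d : PySem.Dict String (List String))
    (s : List String) (hs : ∀ x ∈ s, x ∈ (pvA0 d caps).keys) :
    ∀ x ∈ pvSched s caps, x ∈ (pvA0 d caps).keys := by
  induction caps generalizing d s with
  | nil => exact hs
  | cons nc rest ih =>
    obtain ⟨m, c⟩ := nc
    by_cases hc : c > 0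
    · have h1 : pvA0 d ((m, c) :: rest) = pvA0 (d.insert m []) rest := by simp [pvA0, hc]
      have h2 : pvSched s ((m, c) :: rest)
          = pvSched (s ++ List.replicate (max 0 c).toNat m) rest := by simp [pvSched]
      rw [h1, h2]
      rw [h1] at hs
      apply ih
      intro x hx
      rcases List.mem_append.mp hx with hx | hx
      · exact hs x hx
      · have := List.eq_of_mem_replicate hx
        subst this
        exact pvKeysMono _ _ _ ((PySem.Dict.mem_keys_insert _ _ _ _).mpr (Or.inl rfl))
    · have h1 : pvA0 d ((m, c) :: rest) = pvA0 d rest := by simp [pvA0, hc]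
      have hmax : (max 0 c).toNat = 0 := by omega
      have h2 : pvSched s ((m, c) :: rest) = pvSched s rest := by simp [pvSched, hmax]
      rw [h1, h2]
      rw [h1] at hs
      exact ih d s hs

-- A's path loop never changes the key list (every looked-up key is present)
theorem pvKeysFold (l : List (Int × String)) (key : Int × String → String)
    (d : PySem.Dict String (List String)) (h : ∀ ip ∈ l, key ip ∈ d.keys) :
    (l.foldl (fun d ip => d.modify (key ip) [] (fun v => v ++ [ip.2])) d).keys = d.keys := by
  induction l generalizing d with
  | nil => rfl
  | cons ip rest ih =>
    have hk : (d.modify (key ip) [] (fun v => v ++ [ip.2])).keys = d.keys := by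
      rw [PySem.Dict.keys_modify,
          PySem.Dict.keys_insert_of_contains _ _
            ((PySem.Dict.contains_iff_mem_keys _ _).mpr (h ip (List.mem_cons_self)))]
    rw [List.foldl_cons, ih _ (by intro q hq; rw [hk]; exact h q (List.mem_cons_of_mem _ hq)), hk]

theorem pvFilterMapIf {α β : Type} (l : List α) (p : α → Bool) (f : α → β) :
    l.filterMap (fun x => if p x then some (f x) else none) = (l.filter p).map f := by
  induction l with
  | nil => rfl
  | cons x xs ih =>
    by_cases hx : p x
    · simp [hx, ih]
    · simp [hx, ih]

-- value of A's path loop at a key: the paths whose slot owner is that key, in order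
theorem pvFoldVal (l : List (Int × String)) (key : Int × String → String)
    (d : PySem.Dict String (List String)) (k : String) :
    (l.foldl (fun d ip => d.modify (key ip) [] (fun v => v ++ [ip.2])) d).getD k []
      = d.getD k [] ++ (l.filter (fun ip => key ip == k)).map (fun ip => ip.2) := by
  have h1 : l.foldl (fun d ip => d.modify (key ip) [] (fun v => v ++ [ip.2])) d
      = (l.map (fun ip => (key ip, ip.2))).foldl (fun d p => d.modify p.1 [] (fun v => v ++ [p.2])) d := by
    rw [List.foldl_map]
  rw [h1, PySem.Dict.getD_foldl_modify_append, List.filter_map, List.map_map]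
  simp [Function.comp_def]

-- ===== VERDICT (by name: the statement is the Claim_ definition above) =====
theorem partition_paths_by_capacity_spec : Claim_equal_partition_paths_by_capacity := by
  intro paths caps _
  unfold Spec_partition_paths_by_capacity
  rw [pvA_eq, pvB_eq]
  have hM := pvMaster caps PySem.Dict.empty []
    (by intro name se hse; simp at hse)
    (by intro name r hr0 hrlt; simp at hrlt; omega)
  simp only [List.length_nil, Nat.cast_zero] at hM
  obtain ⟨hT, -, hMatch⟩ := hM
  have hkeys : (pvA0 PySem.Dict.empty caps).keys = (pvWin (PySem.Dict.empty, 0) caps).1.keys :=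
    pvKeysPar caps _ _ 0 rfl
  have hndA : (pvA0 PySem.Dict.empty caps).keys.Nodup := pvA0_nodup caps _ (by simp)
  have hndW : (pvWin (PySem.Dict.empty, 0) caps).1.keys.Nodup := hkeys ▸ hndA
  have hgd0 : ∀ k, (pvA0 PySem.Dict.empty caps).getD k [] = [] :=
    pvA0_getD caps _ (by intro k; simp)
  by_cases hSnil : pvSched [] caps = []
  · have hT0 : (pvWin (PySem.Dict.empty, 0) caps).2 = 0 := by rw [hT, hSnil]; simp
    rw [if_pos hSnil, if_pos hT0]
    rw [PySem.Dict.items_eq_map_keys _ hndA [], PySem.Dict.items_eq_map_keys _ hndW [],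
        List.map_map, hkeys]
    apply List.map_congr_left
    intro k hk
    simp [hgd0 k]
  · have hlpos : (0:Int) < ((pvSched [] caps).length : Int) := by
      exact_mod_cast List.length_pos_of_ne_nil hSnil
    have hT0 : ¬ (pvWin (PySem.Dict.empty, 0) caps).2 = 0 := by rw [hT]; omega
    rw [if_neg hSnil, if_neg hT0]
    have hkeym : ∀ ip ∈ PySem.List.enumerate paths,
        PySem.List.pyGetD (pvSched [] caps) (PySem.Int.mod ip.1 ((pvSched [] caps).length : Int)) ""
          ∈ (pvA0 PySem.Dict.empty caps).keys := by
      intro ip hip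
      have hr0 := PySem.Int.mod_nonneg ip.1 hlpos
      have hrlt := PySem.Int.mod_lt ip.1 hlpos
      rw [PySem.List.pyGetD_eq_getElem _ "" hr0 hrlt]
      exact pvSchedMem caps _ [] (by intro x hx; cases hx) _ (List.getElem_mem _)
    have hDAkeys : ((PySem.List.enumerate paths).foldl (fun d ip =>
        d.modify (PySem.List.pyGetD (pvSched [] caps)
            (PySem.Int.mod ip.1 ((pvSched [] caps).length : Int)) "") []
          (fun l => l ++ [ip.2])) (pvA0 PySem.Dict.empty caps)).keys
        = (pvA0 PySem.Dict.empty caps).keys :=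
      pvKeysFold _ _ _ hkeym
    rw [PySem.Dict.items_eq_map_keys _ (hDAkeys ▸ hndA) [], hDAkeys,
        PySem.Dict.items_eq_map_keys _ hndW [], List.map_map, hkeys]
    apply List.map_congr_left
    intro k hk
    have hval := pvFoldVal (PySem.List.enumerate paths)
      (fun ip => PySem.List.pyGetD (pvSched [] caps)
        (PySem.Int.mod ip.1 ((pvSched [] caps).length : Int)) "")
      (pvA0 PySem.Dict.empty caps) k
    simp only [Function.comp_def]
    congr 1
    rw [hval, hgd0 k, List.nil_append, pvFilterMapIf]
    congr 1
    apply List.filter_congr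
    intro ip hip
    have hr0 := PySem.Int.mod_nonneg ip.1 hlpos
    have hrlt := PySem.Int.mod_lt ip.1 hlpos
    have hiff := hMatch k (PySem.Int.mod ip.1 ((pvSched [] caps).length : Int)) hr0 hrlt
    rw [hT]
    rw [Bool.eq_iff_iff, beq_iff_eq]
    rw [PySem.List.pyGetD_eq_getElem _ "" hr0 hrlt,
        ← List.getD_eq_getElem (pvSched [] caps) "" (by omega)]
    exact hiff.symm
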